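-- pv_equiv track=rewrite | github.com/teodorjendrisak/Harvard_CS50_Python | 02_Loops/plates.py | numbers_end
-- ===== SOURCE A (Python) =====
-- def numbers_end(ne):
--     for i, char in enumerate(ne):
--         if char.isdigit():
--             if not ne[i:].isdigit():
--                 return False
--             if char == "0":
--                 return False
--             break
--     return True
-- ===== SOURCE B (Python) =====
-- def numbers_end(ne):
--     seen_digit = False
--     for char in ne:
--         if char.isdigit():
--             if not seen_digit and char == "0":
--                 return False
--             seen_digit = True
--         elif seen_digit:
--             return False
--     return True
-- ===== Notes on version B (the rewrite author's own statement) =====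
-- stated objective: simpler
-- what changed: Single left-to-right scan with a seen_digit flag replaces A's find-first-digit-then-slice-and-isdigit-the-suffix approach; no enumerate, no slicing, no suffix re-scan.
import Mathlib
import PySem

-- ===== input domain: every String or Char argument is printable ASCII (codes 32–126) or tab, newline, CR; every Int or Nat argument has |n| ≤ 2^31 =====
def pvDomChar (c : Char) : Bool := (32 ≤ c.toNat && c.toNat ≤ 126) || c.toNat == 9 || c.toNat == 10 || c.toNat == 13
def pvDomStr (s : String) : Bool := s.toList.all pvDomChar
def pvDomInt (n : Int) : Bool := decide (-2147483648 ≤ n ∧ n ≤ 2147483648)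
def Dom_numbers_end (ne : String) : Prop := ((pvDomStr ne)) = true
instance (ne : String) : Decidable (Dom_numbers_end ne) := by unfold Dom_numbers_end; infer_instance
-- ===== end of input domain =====

-- B replaces A's find-first-digit-then-check-the-suffix-with-a-slice scan by one
-- left-to-right pass with a seen_digit flag (simpler; no slicing, no suffix re-scan).

-- ===== PORT A =====
-- the for-loop body of A over the remaining (i, char) pairs of enumerate(ne)
def numbersEndLoopA (ne : String) : List (Int × Char) → Bool
  | [] => true
  | (i, c) :: rest =>
    if PySem.Chars.isdigit c then
      if ¬ (PySem.Str.strIsdigit (PySem.Str.slice ne (some i) none)) then false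
      else if c = '0' then false
      else true  -- break, then return True
    else numbersEndLoopA ne rest

def numbers_end (ne : String) : Bool :=
  numbersEndLoopA ne (PySem.List.enumerate ne.toList 0)

-- ===== PORT B =====
-- B's single pass with the seen_digit flag as the fold state
def numbersEndLoopB : Bool → List Char → Bool
  | _, [] => true
  | seen, c :: cs =>
    if PySem.Chars.isdigit c then
      if !seen && c = '0' then false
      else numbersEndLoopB true cs
    else if seen then false
    else numbersEndLoopB seen cs

def numbers_end_alt (ne : String) : Bool :=
  numbersEndLoopB false ne.toList

-- ===== PRECONDITION & SPEC =====
def Spec_numbers_end (ne : String) (out : Bool) : Prop := out = numbers_end_alt ne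
instance (ne : String) (out : Bool) : Decidable (Spec_numbers_end ne out) := by unfold Spec_numbers_end; infer_instance

-- ===== CLAIM (what is proved, stated in full; the proofs are below) =====
def Claim_equal_numbers_end : Prop := ∀ (ne : String), Dom_numbers_end ne → Spec_numbers_end ne (numbers_end ne)

-- ===== LEMMAS AND PROOFS =====

-- with seen = true, B's loop just checks that every remaining char is a digit
theorem loopB_true (l : List Char) :
    numbersEndLoopB true l = l.all PySem.Chars.isdigit := by
  induction l with
  | nil => simp [numbersEndLoopB]
  | cons c cs ih =>
    simp only [numbersEndLoopB, List.all_cons]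
    by_cases h : PySem.Chars.isdigit c <;> simp [h, ih]

-- the key invariant: A's loop over the enumeration of the suffix ne.toList.drop k
-- (numbered from k) equals B's loop with seen = false on that suffix
theorem loop_eq (ne : String) (k : Nat) (l : List Char) (h : ne.toList.drop k = l) :
    numbersEndLoopA ne (PySem.List.enumerate l (k : Int)) = numbersEndLoopB false l := by
  induction l generalizing k with
  | nil => simp [numbersEndLoopA, numbersEndLoopB, PySem.List.enumerate_nil]
  | cons c cs ih =>
    rw [PySem.List.enumerate_cons]
    simp only [numbersEndLoopA, numbersEndLoopB]
    by_cases hd : PySem.Chars.isdigit c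
    · have hslice : (PySem.Str.slice ne (some (k : Int)) none).toList = c :: cs := by
        rw [PySem.Str.toList_slice, PySem.Chars.slice_eq_listSlice,
            PySem.List.slice_from_natCast, h]
      have : PySem.Str.strIsdigit (PySem.Str.slice ne (some (k : Int)) none)
          = PySem.Chars.strIsdigit (c :: cs) := by
        rw [PySem.Str.strIsdigit_eq, hslice]
      simp only [if_true, this, PySem.Chars.strIsdigit, List.isEmpty_cons,
        Bool.not_false, List.all_cons, hd, Bool.true_and, loopB_true]
      by_cases hz : c = '0' <;>
        cases hall : cs.all PySem.Chars.isdigit <;> simp [hz, hall]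
    · have hdrop : ne.toList.drop (k + 1) = cs := by
        have := congrArg List.tail h
        simpa [List.tail_drop] using this
      have := ih (k + 1) hdrop
      simpa [hd, Int.natCast_add] using this

-- ===== VERDICT (by name: the statement is the Claim_ definition above) =====
theorem numbers_end_spec : Claim_equal_numbers_end := by
  intro ne _
  unfold Spec_numbers_end numbers_end numbers_end_alt
  simpa using loop_eq ne 0 ne.toList (by simp)
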